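-- pv_equiv track=rewrite | github.com/jhyeonjung97/verve | .ipynb_checkpoints/comb-checkpoint.py | generate_symmetries
-- ===== SOURCE A (Python) =====
-- def generate_symmetries(comb):
--     symmetries = set()
--     comb = list(comb)
--
--     # Original combination
--     symmetries.add(tuple(comb))
--
--     # Define the indices for each rotation
--     rotation_indices = [
--         [0, 1, 5, 4, 3, 2, 6, 7], [0, 1, 6, 7, 4, 5, 2, 3], [0, 1, 2, 3, 4, 5, 6, 7],
--         [4, 0, 3, 7, 5, 1, 2, 6], [1, 5, 6, 2, 0, 4, 7, 3], [4, 5, 6, 7, 0, 1, 2, 3],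
--         [1, 2, 6, 5, 0, 3, 7, 4], [3, 2, 6, 7, 0, 1, 5, 4], [0, 3, 7, 4, 1, 2, 6, 5]
--     ]
--
--     # Define the indices for each reflection
--     reflection_indices = [
--         [4, 5, 6, 7, 0, 1, 2, 3],
--         [1, 0, 3, 2, 5, 4, 7, 6],
--         [2, 3, 0, 1, 6, 7, 4, 5]
--     ]
--
--     for indices in rotation_indices:
--         rotated_comb = [comb[i] for i in indices]
--         symmetries.add(tuple(rotated_comb))
--         for ref_indices in reflection_indices:
--             reflected_comb = [rotated_comb[i] for i in ref_indices]
--             symmetries.add(tuple(reflected_comb))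
--
--     return symmetries
-- ===== SOURCE B (Python) =====
-- # B: the 36 rotate/reflect compositions generate only 28 distinct index permutations
-- # (the symmetry group, deduplicated in first-occurrence order); keep that group as one
-- # flat literal table and build the result set in a single loop indexing comb directly.
--
-- _GROUP = [
--     (0, 1, 5, 4, 3, 2, 6, 7), (3, 2, 6, 7, 0, 1, 5, 4), (1, 0, 4, 5, 2, 3, 7, 6),
--     (5, 4, 0, 1, 6, 7, 3, 2), (0, 1, 6, 7, 4, 5, 2, 3), (4, 5, 2, 3, 0, 1, 6, 7),
--     (1, 0, 7, 6, 5, 4, 3, 2), (6, 7, 0, 1, 2, 3, 4, 5), (0, 1, 2, 3, 4, 5, 6, 7),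
--     (4, 5, 6, 7, 0, 1, 2, 3), (1, 0, 3, 2, 5, 4, 7, 6), (2, 3, 0, 1, 6, 7, 4, 5),
--     (4, 0, 3, 7, 5, 1, 2, 6), (5, 1, 2, 6, 4, 0, 3, 7), (0, 4, 7, 3, 1, 5, 6, 2),
--     (3, 7, 4, 0, 2, 6, 5, 1), (1, 5, 6, 2, 0, 4, 7, 3), (6, 2, 1, 5, 7, 3, 0, 4),
--     (5, 4, 7, 6, 1, 0, 3, 2), (6, 7, 4, 5, 2, 3, 0, 1), (1, 2, 6, 5, 0, 3, 7, 4),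
--     (0, 3, 7, 4, 1, 2, 6, 5), (2, 1, 5, 6, 3, 0, 4, 7), (6, 5, 1, 2, 7, 4, 0, 3),
--     (2, 3, 7, 6, 1, 0, 4, 5), (6, 7, 3, 2, 5, 4, 0, 1), (3, 0, 4, 7, 2, 1, 5, 6),
--     (7, 4, 0, 3, 6, 5, 1, 2),
-- ]
--
--
-- def generate_symmetries(comb):
--     comb = list(comb)
--     symmetries = {tuple(comb)}
--     for p in _GROUP:
--         symmetries.add(tuple(comb[i] for i in p))
--     return symmetries
-- ===== Notes on version B (the rewrite author's own statement) =====
-- stated objective: alternative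
-- what changed: B replaces A's nested rotate-then-reflect loops with one flat literal table of the 28 distinct composed index permutations (the deduplicated symmetry group) and a single loop that indexes comb once per permutation.
import Mathlib
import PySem

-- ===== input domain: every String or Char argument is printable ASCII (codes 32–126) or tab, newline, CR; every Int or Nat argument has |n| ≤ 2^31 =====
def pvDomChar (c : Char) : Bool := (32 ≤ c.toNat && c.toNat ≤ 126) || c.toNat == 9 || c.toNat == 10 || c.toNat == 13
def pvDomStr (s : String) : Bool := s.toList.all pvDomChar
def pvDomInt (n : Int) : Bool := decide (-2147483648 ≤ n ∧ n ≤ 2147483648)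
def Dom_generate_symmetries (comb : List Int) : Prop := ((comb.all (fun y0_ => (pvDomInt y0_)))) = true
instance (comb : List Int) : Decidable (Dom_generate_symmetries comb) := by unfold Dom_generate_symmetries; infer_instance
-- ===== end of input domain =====

-- B replaces A's nested rotate-then-reflect loops with one flat literal table of the 28
-- distinct composed index permutations and a single loop (objective: alternative).
-- Indexing uses pyGetD, exact under Pre_ (all indices are 0..7 and the list has ≥ 8 elements).

-- ===== PORT A =====
def generate_symmetries (comb : List Int) : List (List Int) :=
  let symmetries : PySem.Set (List Int) := PySem.Set.add PySem.Set.empty comb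
  let rotation_indices : List (List Int) := [
    [0, 1, 5, 4, 3, 2, 6, 7], [0, 1, 6, 7, 4, 5, 2, 3], [0, 1, 2, 3, 4, 5, 6, 7],
    [4, 0, 3, 7, 5, 1, 2, 6], [1, 5, 6, 2, 0, 4, 7, 3], [4, 5, 6, 7, 0, 1, 2, 3],
    [1, 2, 6, 5, 0, 3, 7, 4], [3, 2, 6, 7, 0, 1, 5, 4], [0, 3, 7, 4, 1, 2, 6, 5]]
  let reflection_indices : List (List Int) := [
    [4, 5, 6, 7, 0, 1, 2, 3],
    [1, 0, 3, 2, 5, 4, 7, 6],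
    [2, 3, 0, 1, 6, 7, 4, 5]]
  rotation_indices.foldl (fun symmetries indices =>
    let rotated_comb := indices.map (fun i => PySem.List.pyGetD comb i 0)
    let symmetries := PySem.Set.add symmetries rotated_comb
    reflection_indices.foldl (fun symmetries ref_indices =>
      PySem.Set.add symmetries (ref_indices.map (fun j => PySem.List.pyGetD rotated_comb j 0)))
      symmetries)
    symmetries

-- ===== PORT B =====
-- Source B's module-level _GROUP: the 28 distinct composed permutations, a literal table
def pvGroup : List (List Int) := [
  [0, 1, 5, 4, 3, 2, 6, 7], [3, 2, 6, 7, 0, 1, 5, 4], [1, 0, 4, 5, 2, 3, 7, 6],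
  [5, 4, 0, 1, 6, 7, 3, 2], [0, 1, 6, 7, 4, 5, 2, 3], [4, 5, 2, 3, 0, 1, 6, 7],
  [1, 0, 7, 6, 5, 4, 3, 2], [6, 7, 0, 1, 2, 3, 4, 5], [0, 1, 2, 3, 4, 5, 6, 7],
  [4, 5, 6, 7, 0, 1, 2, 3], [1, 0, 3, 2, 5, 4, 7, 6], [2, 3, 0, 1, 6, 7, 4, 5],
  [4, 0, 3, 7, 5, 1, 2, 6], [5, 1, 2, 6, 4, 0, 3, 7], [0, 4, 7, 3, 1, 5, 6, 2],
  [3, 7, 4, 0, 2, 6, 5, 1], [1, 5, 6, 2, 0, 4, 7, 3], [6, 2, 1, 5, 7, 3, 0, 4],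
  [5, 4, 7, 6, 1, 0, 3, 2], [6, 7, 4, 5, 2, 3, 0, 1], [1, 2, 6, 5, 0, 3, 7, 4],
  [0, 3, 7, 4, 1, 2, 6, 5], [2, 1, 5, 6, 3, 0, 4, 7], [6, 5, 1, 2, 7, 4, 0, 3],
  [2, 3, 7, 6, 1, 0, 4, 5], [6, 7, 3, 2, 5, 4, 0, 1], [3, 0, 4, 7, 2, 1, 5, 6],
  [7, 4, 0, 3, 6, 5, 1, 2]]

def generate_symmetries_alt (comb : List Int) : List (List Int) :=
  pvGroup.foldl
    (fun symmetries p => PySem.Set.add symmetries (p.map (fun i => PySem.List.pyGetD comb i 0)))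
    (PySem.Set.add PySem.Set.empty comb)

-- ===== PRECONDITION & SPEC =====
-- Python A raises IndexError on lists shorter than 8 (so does B); exactly those are excluded.
def Pre_generate_symmetries (comb : List Int) : Prop := 8 ≤ comb.length
instance (comb : List Int) : Decidable (Pre_generate_symmetries comb) := by unfold Pre_generate_symmetries; infer_instance
def pvWitness_generate_symmetries : List Int := [1, 2, 3, 4, 5, 6, 7, 8]

def Spec_generate_symmetries (comb : List Int) (out : List (List Int)) : Prop := out = generate_symmetries_alt comb
instance (comb : List Int) (out : List (List Int)) : Decidable (Spec_generate_symmetries comb out) := by unfold Spec_generate_symmetries; infer_instance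

-- ===== CLAIM (what is proved, stated in full; the proofs are below) =====
def Claim_equal_generate_symmetries : Prop := ∀ (comb : List Int), Dom_generate_symmetries comb → Pre_generate_symmetries comb → Spec_generate_symmetries comb (generate_symmetries comb)

-- ===== LEMMAS AND PROOFS =====

-- proof-only: apply a permutation index list, and A's 36-application sequence
def pvApply (comb : List Int) (p : List Int) : List Int :=
  p.map (fun i => PySem.List.pyGetD comb i 0)

def pvSeqA : List (List Int) := [
  [0, 1, 5, 4, 3, 2, 6, 7], [3, 2, 6, 7, 0, 1, 5, 4], [1, 0, 4, 5, 2, 3, 7, 6], [5, 4, 0, 1, 6, 7, 3, 2],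
  [0, 1, 6, 7, 4, 5, 2, 3], [4, 5, 2, 3, 0, 1, 6, 7], [1, 0, 7, 6, 5, 4, 3, 2], [6, 7, 0, 1, 2, 3, 4, 5],
  [0, 1, 2, 3, 4, 5, 6, 7], [4, 5, 6, 7, 0, 1, 2, 3], [1, 0, 3, 2, 5, 4, 7, 6], [2, 3, 0, 1, 6, 7, 4, 5],
  [4, 0, 3, 7, 5, 1, 2, 6], [5, 1, 2, 6, 4, 0, 3, 7], [0, 4, 7, 3, 1, 5, 6, 2], [3, 7, 4, 0, 2, 6, 5, 1],
  [1, 5, 6, 2, 0, 4, 7, 3], [0, 4, 7, 3, 1, 5, 6, 2], [5, 1, 2, 6, 4, 0, 3, 7], [6, 2, 1, 5, 7, 3, 0, 4],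
  [4, 5, 6, 7, 0, 1, 2, 3], [0, 1, 2, 3, 4, 5, 6, 7], [5, 4, 7, 6, 1, 0, 3, 2], [6, 7, 4, 5, 2, 3, 0, 1],
  [1, 2, 6, 5, 0, 3, 7, 4], [0, 3, 7, 4, 1, 2, 6, 5], [2, 1, 5, 6, 3, 0, 4, 7], [6, 5, 1, 2, 7, 4, 0, 3],
  [3, 2, 6, 7, 0, 1, 5, 4], [0, 1, 5, 4, 3, 2, 6, 7], [2, 3, 7, 6, 1, 0, 4, 5], [6, 7, 3, 2, 5, 4, 0, 1],
  [0, 3, 7, 4, 1, 2, 6, 5], [1, 2, 6, 5, 0, 3, 7, 4], [3, 0, 4, 7, 2, 1, 5, 6], [7, 4, 0, 3, 6, 5, 1, 2]]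

-- pyGetD on a literal 8-element list at each numeral index
theorem pvGetD8_0 (a0 a1 a2 a3 a4 a5 a6 a7 d : Int) : PySem.List.pyGetD [a0,a1,a2,a3,a4,a5,a6,a7] 0 d = a0 := rfl
theorem pvGetD8_1 (a0 a1 a2 a3 a4 a5 a6 a7 d : Int) : PySem.List.pyGetD [a0,a1,a2,a3,a4,a5,a6,a7] 1 d = a1 := rfl
theorem pvGetD8_2 (a0 a1 a2 a3 a4 a5 a6 a7 d : Int) : PySem.List.pyGetD [a0,a1,a2,a3,a4,a5,a6,a7] 2 d = a2 := rfl
theorem pvGetD8_3 (a0 a1 a2 a3 a4 a5 a6 a7 d : Int) : PySem.List.pyGetD [a0,a1,a2,a3,a4,a5,a6,a7] 3 d = a3 := rfl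
theorem pvGetD8_4 (a0 a1 a2 a3 a4 a5 a6 a7 d : Int) : PySem.List.pyGetD [a0,a1,a2,a3,a4,a5,a6,a7] 4 d = a4 := rfl
theorem pvGetD8_5 (a0 a1 a2 a3 a4 a5 a6 a7 d : Int) : PySem.List.pyGetD [a0,a1,a2,a3,a4,a5,a6,a7] 5 d = a5 := rfl
theorem pvGetD8_6 (a0 a1 a2 a3 a4 a5 a6 a7 d : Int) : PySem.List.pyGetD [a0,a1,a2,a3,a4,a5,a6,a7] 6 d = a6 := rfl
theorem pvGetD8_7 (a0 a1 a2 a3 a4 a5 a6 a7 d : Int) : PySem.List.pyGetD [a0,a1,a2,a3,a4,a5,a6,a7] 7 d = a7 := rfl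

theorem pvUpdate_append_singleton {β : Type} [BEq β] (s : PySem.Set β) (xs : List β) (x : β) :
    PySem.Set.update s (xs ++ [x]) = PySem.Set.add (PySem.Set.update s xs) x := by
  simp [PySem.Set.update, List.foldl_append]

theorem pvDedup_append_singleton {α : Type} [BEq α] [LawfulBEq α] (l : List α) (x : α) :
    PySem.List.dedup (l ++ [x]) =
      if x ∈ l then PySem.List.dedup l else PySem.List.dedup l ++ [x] := by
  simp only [PySem.List.dedup_eq_ofList, PySem.Set.ofList_append_singleton,
    PySem.Set.add_eq_ite, PySem.Set.mem_ofList]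

theorem pvUpdateMapDedup {α β : Type} [BEq α] [LawfulBEq α] [BEq β] [LawfulBEq β]
    (f : α → β) (l : List α) (s : PySem.Set β) :
    PySem.Set.update s (l.map f) = PySem.Set.update s ((PySem.List.dedup l).map f) := by
  induction l using List.reverseRecOn with
  | nil => rfl
  | append_singleton l x ih =>
      rw [List.map_append, List.map_singleton, pvUpdate_append_singleton,
        pvDedup_append_singleton]
      by_cases hx : x ∈ l
      · simp only [if_pos hx]
        rw [ih, ← ih]
        exact PySem.Set.add_of_mem ((PySem.Set.mem_update _ _ _).mpr (Or.inr (List.mem_map_of_mem hx)))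
      · simp only [if_neg hx, List.map_append, List.map_singleton,
          pvUpdate_append_singleton, ih]

theorem pvA_flat (comb : List Int) :
    generate_symmetries comb =
      PySem.Set.update (PySem.Set.add PySem.Set.empty comb) (pvSeqA.map (pvApply comb)) := by
  simp only [generate_symmetries, pvSeqA, pvApply, PySem.Set.update, List.foldl, List.map,
    pvGetD8_0, pvGetD8_1, pvGetD8_2, pvGetD8_3, pvGetD8_4, pvGetD8_5, pvGetD8_6, pvGetD8_7]

theorem pvB_flat (comb : List Int) :
    generate_symmetries_alt comb =
      PySem.Set.update (PySem.Set.add PySem.Set.empty comb) (pvGroup.map (pvApply comb)) := by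
  simp only [generate_symmetries_alt, pvGroup, pvApply, PySem.Set.update, List.foldl, List.map]

theorem pvGroup_eq_dedup : pvGroup = PySem.List.dedup pvSeqA := by decide

-- ===== VERDICT (by name: the statement is the Claim_ definition above) =====
set_option maxHeartbeats 2000000 in
theorem generate_symmetries_spec : Claim_equal_generate_symmetries := by
  intro comb _ _
  show generate_symmetries comb = generate_symmetries_alt comb
  rw [pvA_flat, pvB_flat, pvGroup_eq_dedup, ← pvUpdateMapDedup]
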